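-- pv_equiv track=rewrite | github.com/SemGDT/smart_compare_docx | smart_cmp_docx.py | flatten_poem_lines
-- ===== SOURCE A (Python) =====
-- def flatten_poem_lines(paragraphs, window_size=4):
--     """
--     Detect and flatten poem sections (short lines that should be grouped).
--     If we see multiple consecutive short paragraphs (< 50 chars), combine them.
--     """
--     result = []
--     i = 0
--     while i < len(paragraphs):
--         para = paragraphs[i]
--
--         # Check if this looks like a poem line (short paragraph)
--         if len(para) < 50:
--             # Look ahead to see if next few are also short (poem continues)
--             poem_lines = [para]
--             j = i + 1
--             while j < len(paragraphs) and len(paragraphs[j]) < 50 and j < i + 20: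
--                 poem_lines.append(paragraphs[j])
--                 j += 1
--
--             # If we found multiple short lines, it's probably a poem - flatten it
--             if len(poem_lines) >= window_size:
--                 flattened = ' '.join(poem_lines)
--                 result.append(flattened)
--                 i = j
--             else:
--                 # Not enough short lines, treat as normal paragraph
--                 result.append(para)
--                 i += 1
--         else:
--             # Normal paragraph
--             result.append(para)
--             i += 1
--
--     return result
-- ===== SOURCE B (Python) =====
-- def _emit_run(run, window_size, result):
--     """Emit one maximal run of short paragraphs: slice it into consecutive
--     20-element chunks; a chunk of at least window_size lines is joined into
--     one flattened line, a shorter chunk is emitted paragraph by paragraph."""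
--     for k in range(0, len(run), 20):
--         chunk = run[k:k + 20]
--         if len(chunk) >= window_size:
--             result.append(' '.join(chunk))
--         else:
--             result.extend(chunk)
--
--
-- def flatten_poem_lines(paragraphs, window_size=4):
--     result = []
--     run = []
--     for para in paragraphs:
--         if len(para) < 50:
--             run.append(para)
--         else:
--             _emit_run(run, window_size, result)
--             run = []
--             result.append(para)
--     _emit_run(run, window_size, result)
--     return result
-- ===== Notes on version B (the rewrite author's own statement) =====
-- stated objective: alternative
-- what changed: Replaces A's interleaved index walk with re-scanned look-ahead (re-checking shortness of up to 19 paragraphs at every position) by a single pass that collects each maximal run of short paragraphs and then slices it into 20-element chunks, joining a chunk iff it reaches window_size.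
import Mathlib
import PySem

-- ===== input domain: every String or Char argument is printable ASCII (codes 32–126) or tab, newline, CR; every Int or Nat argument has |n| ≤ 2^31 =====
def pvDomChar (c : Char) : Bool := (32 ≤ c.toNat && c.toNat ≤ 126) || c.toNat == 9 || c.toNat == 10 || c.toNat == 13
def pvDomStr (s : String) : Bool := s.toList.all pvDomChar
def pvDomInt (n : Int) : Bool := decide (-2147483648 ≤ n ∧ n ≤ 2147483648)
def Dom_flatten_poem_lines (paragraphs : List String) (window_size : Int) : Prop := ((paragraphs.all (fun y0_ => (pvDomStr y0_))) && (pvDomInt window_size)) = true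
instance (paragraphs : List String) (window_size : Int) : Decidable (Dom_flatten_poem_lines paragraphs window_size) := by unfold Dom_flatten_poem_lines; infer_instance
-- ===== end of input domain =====

-- B replaces A's index walk with repeated 19-element look-ahead by a single pass that
-- collects maximal runs of short paragraphs and then chunks each run (alternative decomposition).


-- ===== PORT A =====
-- len(para) < 50
def pvShort (p : String) : Bool := PySem.Str.len p < 50

-- A's inner `while j < len and len(paragraphs[j]) < 50 and j < i + 20` look-ahead:
-- collects up to n further consecutive short paragraphs from the rest of the list.
def pvLookahead (tl : List String) (n : Nat) : List String :=
  match n, tl with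
  | 0, _ => []
  | _, [] => []
  | n + 1, q :: t => if pvShort q then q :: pvLookahead t n else []

-- A's outer while-loop; the index i becomes the suffix `rest` of `paragraphs`.
def pvLoopA (rest : List String) (ws : Int) : List String :=
  match rest with
  | [] => []
  | p :: tl =>
    if pvShort p then
      let poem := p :: pvLookahead tl 19
      if (poem.length : Int) ≥ ws then
        PySem.Str.join " " poem :: pvLoopA (tl.drop (poem.length - 1)) ws
      else
        p :: pvLoopA tl ws
    else
      p :: pvLoopA tl ws
termination_by rest.length
decreasing_by all_goals (simp [List.length_drop]; try omega)

def flatten_poem_lines (paragraphs : List String) (window_size : Int) : List String :=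
  pvLoopA paragraphs window_size

-- ===== PORT B =====
-- Source B's _emit_run: slice a run into consecutive 20-element chunks; a chunk of at least
-- window_size lines is joined, a shorter one is emitted paragraph by paragraph.
def pvEmit (run : List String) (ws : Int) : List String :=
  match run with
  | [] => []
  | q :: t =>
    let chunk := (q :: t).take 20
    (if (chunk.length : Int) ≥ ws then [PySem.Str.join " " chunk] else chunk)
      ++ pvEmit ((q :: t).drop 20) ws
termination_by run.length
decreasing_by simp [List.length_drop]; try omega

def flatten_poem_lines_alt (paragraphs : List String) (window_size : Int) : List String :=
  let st := paragraphs.foldl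
    (fun (st : List String × List String) p =>
      if pvShort p then (st.1, st.2 ++ [p])
      else (st.1 ++ pvEmit st.2 window_size ++ [p], []))
    ([], [])
  st.1 ++ pvEmit st.2 window_size

-- ===== PRECONDITION & SPEC =====
def Spec_flatten_poem_lines (paragraphs : List String) (window_size : Int) (out : List String) : Prop := out = flatten_poem_lines_alt paragraphs window_size
instance (paragraphs : List String) (window_size : Int) (out : List String) : Decidable (Spec_flatten_poem_lines paragraphs window_size out) := by unfold Spec_flatten_poem_lines; infer_instance

-- ===== CLAIM (what is proved, stated in full; the proofs are below) =====
def Claim_equal_flatten_poem_lines : Prop := ∀ (paragraphs : List String) (window_size : Int), Dom_flatten_poem_lines paragraphs window_size → Spec_flatten_poem_lines paragraphs window_size (flatten_poem_lines paragraphs window_size)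

-- ===== LEMMAS AND PROOFS =====

-- Recursive rendering of B's fold-with-accumulators.
def pvLoopB (rest : List String) (run : List String) (ws : Int) : List String :=
  match rest with
  | [] => pvEmit run ws
  | p :: tl =>
    if pvShort p then pvLoopB tl (run ++ [p]) ws
    else pvEmit run ws ++ p :: pvLoopB tl [] ws

-- Canonical form both loops are reduced to.
def pvSpec (rest : List String) (ws : Int) : List String :=
  match rest with
  | [] => []
  | p :: tl =>
    if pvShort p then
      pvEmit (p :: tl.takeWhile pvShort) ws ++ pvSpec (tl.dropWhile pvShort) ws
    else
      p :: pvSpec tl ws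
termination_by rest.length
decreasing_by all_goals (simp only [List.length_cons]; have h := List.length_dropWhile_le (p := pvShort) (l := tl); omega)

-- One step of pvSpec at a position whose head (if any) is not short.
def pvSpecTail (l : List String) (ws : Int) : List String :=
  match l with
  | [] => []
  | p :: tl => p :: pvSpec tl ws

theorem foldl_eq_loopB (rest res run : List String) (ws : Int) :
    (let st := rest.foldl
      (fun (st : List String × List String) p =>
        if pvShort p then (st.1, st.2 ++ [p])
        else (st.1 ++ pvEmit st.2 ws ++ [p], []))
      (res, run)
     st.1 ++ pvEmit st.2 ws) = res ++ pvLoopB rest run ws := by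
  induction rest generalizing res run with
  | nil => simp [pvLoopB]
  | cons p tl ih =>
    simp only [List.foldl_cons, pvLoopB]
    by_cases hs : pvShort p
    · simp only [hs, if_true]; exact ih res (run ++ [p])
    · simp only [hs, if_false, Bool.false_eq_true]
      rw [ih]
      simp [List.append_assoc]

theorem run_split (u d : List String)
    (hu : ∀ x ∈ u, pvShort x = true)
    (hd : ∀ q, d.head? = some q → pvShort q = false) :
    (u ++ d).takeWhile pvShort = u ∧ (u ++ d).dropWhile pvShort = d := by
  induction u with
  | nil =>
    cases d with
    | nil => simp
    | cons q t' =>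
      have hq := hd q rfl
      simp [List.dropWhile_cons, hq]
  | cons a u ih =>
    have ha := hu a (List.mem_cons_self)
    have ih' := ih (fun x hx => hu x (List.mem_cons_of_mem _ hx))
    simp [ha, ih'.1, ih'.2]

theorem head_dropWhile_false (l : List String) (q : String)
    (h : (l.dropWhile pvShort).head? = some q) : pvShort q = false := by
  have := List.head?_dropWhile_not (p := pvShort) (l := l)
  rw [h] at this
  simpa using this

theorem pvEmit_nil (ws : Int) : pvEmit [] ws = [] := by rw [pvEmit.eq_def]

theorem pvEmit_cons (q : String) (t : List String) (ws : Int) :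
    pvEmit (q :: t) ws =
      (if ((((q :: t).take 20).length : Nat) : Int) ≥ ws
        then [PySem.Str.join " " ((q :: t).take 20)] else (q :: t).take 20)
      ++ pvEmit ((q :: t).drop 20) ws := by
  rw [pvEmit.eq_def]

theorem pvSpecTail_dropWhile (l : List String) (ws : Int) :
    pvSpecTail (l.dropWhile pvShort) ws = pvSpec (l.dropWhile pvShort) ws := by
  cases h : l.dropWhile pvShort with
  | nil => rw [pvSpecTail, pvSpec.eq_def]
  | cons q t =>
    have hq : pvShort q = false := head_dropWhile_false l q (by rw [h]; rfl)
    have h2 : pvSpec (q :: t) ws = q :: pvSpec t ws := by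
      rw [pvSpec.eq_def]
      first
        | rfl
        | simp only [hq, Bool.false_eq_true, if_false]
        | simp [hq]
    rw [pvSpecTail, h2]

theorem pvSpec_char (rest : List String) (ws : Int) :
    pvSpec rest ws = pvEmit (rest.takeWhile pvShort) ws ++ pvSpecTail (rest.dropWhile pvShort) ws := by
  cases rest with
  | nil => rw [pvSpec.eq_def, pvEmit.eq_def]; rfl
  | cons p tl =>
    by_cases hs : pvShort p
    · rw [pvSpec.eq_def]
      simp only [hs, if_true, List.takeWhile_cons, List.dropWhile_cons]
      rw [pvSpecTail_dropWhile]
    · rw [pvSpec.eq_def]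
      simp only [hs, Bool.false_eq_true, if_false, List.takeWhile_cons, List.dropWhile_cons]
      rw [pvEmit.eq_def, pvSpecTail]
      simp

theorem loopB_eq_spec (rest run : List String) (ws : Int) :
    pvLoopB rest run ws = pvEmit (run ++ rest.takeWhile pvShort) ws ++ pvSpecTail (rest.dropWhile pvShort) ws := by
  induction rest generalizing run with
  | nil => simp [pvLoopB, pvSpecTail]
  | cons p tl ih =>
    by_cases hs : pvShort p
    · rw [pvLoopB]
      simp only [hs, if_true, List.takeWhile_cons, List.dropWhile_cons]
      rw [ih]
      simp [List.append_assoc]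
    · rw [pvLoopB]
      simp only [hs, Bool.false_eq_true, if_false, List.takeWhile_cons, List.dropWhile_cons]
      rw [ih]
      simp only [List.nil_append, List.append_nil]
      rw [← pvSpec_char tl ws, pvSpecTail]

theorem lookahead_eq (tl : List String) (n : Nat) :
    pvLookahead tl n = (tl.takeWhile pvShort).take n := by
  induction tl generalizing n with
  | nil => cases n <;> simp [pvLookahead]
  | cons q t ih =>
    cases n with
    | zero => simp [pvLookahead]
    | succ m =>
      by_cases hq : pvShort q
      · simp [pvLookahead, hq, ih]
      · simp [pvLookahead, hq]

theorem pvEmit_id_aux (n : Nat) : ∀ (x : List String) (ws : Int), x.length ≤ n → (min 20 x.length : Int) < ws → pvEmit x ws = x := by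
  induction n with
  | zero =>
    intro x ws h _
    have : x = [] := by cases x <;> simp_all
    subst this; rw [pvEmit.eq_def]
  | succ n ih =>
    intro x ws hlen h
    cases x with
    | nil => rw [pvEmit.eq_def]
    | cons q t =>
      rw [pvEmit.eq_def]
      simp only [List.length_cons] at h
      have hc : ¬ (((((q :: t).take 20).length : Nat) : Int) ≥ ws) := by
        simp only [List.length_take, List.length_cons]
        push_cast at h ⊢
        omega
      simp only [hc, if_false]
      have h1 : ((q :: t).drop 20).length ≤ n := by
        simp only [List.length_drop, List.length_cons]
        simp only [List.length_cons] at hlen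
        omega
      have h2 : (min 20 ((q :: t).drop 20).length : Int) < ws := by
        simp only [List.length_drop, List.length_cons]
        push_cast at h ⊢
        omega
      rw [ih _ ws h1 h2]
      simp

theorem pvEmit_id (x : List String) (ws : Int) (h : (min 20 x.length : Int) < ws) :
    pvEmit x ws = x :=
  pvEmit_id_aux x.length x ws le_rfl h

theorem loopA_eq_spec_aux (n : Nat) : ∀ (rest : List String) (ws : Int), rest.length ≤ n → pvLoopA rest ws = pvSpec rest ws := by
  induction n with
  | zero =>
    intro rest ws h
    have : rest = [] := by cases rest <;> simp_all
    subst this; rw [pvLoopA.eq_def, pvSpec.eq_def]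
  | succ n ih =>
    intro rest ws hlen
    cases rest with
    | nil => rw [pvLoopA.eq_def, pvSpec.eq_def]
    | cons p tl =>
      by_cases hs : pvShort p
      · -- short head: A builds poem = p :: first min(19,|t|) of the short run
        set t := tl.takeWhile pvShort with ht
        set d := tl.dropWhile pvShort with hd2
        have htd : t ++ d = tl := List.takeWhile_append_dropWhile
        have ht_short : ∀ x ∈ t, pvShort x = true := fun x hx => List.mem_takeWhile_imp hx
        have hd_head : ∀ q, d.head? = some q → pvShort q = false := head_dropWhile_false tl
        have hpoem : p :: pvLookahead tl 19 = p :: t.take 19 := by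
          rw [lookahead_eq]
        have hpoemlen : (p :: pvLookahead tl 19).length = min 19 t.length + 1 := by
          rw [hpoem]; simp [List.length_take, Nat.min_comm]
        have htl_len : tl.length ≤ n := by simp at hlen; omega
        have hchunk : (p :: t).take 20 = p :: t.take 19 := by simp
        rw [pvLoopA.eq_def]
        simp only [hs, if_true]
        rw [pvSpec.eq_def]
        simp only [hs, if_true, ← ht, ← hd2]
        by_cases hw : (((p :: pvLookahead tl 19).length : Int) ≥ ws)
        · rw [if_pos hw]
          have hwlen : ((min 19 t.length + 1 : Nat) : Int) ≥ ws := by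
            rw [hpoemlen] at hw; exact_mod_cast hw
          rw [pvEmit_cons]
          have hchunklen : (((p :: t).take 20).length : Int) ≥ ws := by
            rw [hchunk]; simp only [List.length_cons, List.length_take]
            exact_mod_cast (by simpa [Nat.min_comm] using hwlen)
          rw [if_pos hchunklen, hchunk, ← hpoem]
          simp only [List.cons_append]
          congr 1
          have hdrop20 : (p :: t).drop 20 = t.drop 19 := by simp
          rw [hdrop20]
          have hidx : (p :: pvLookahead tl 19).length - 1 = min 19 t.length := by omega
          rw [hidx]
          by_cases hbig : t.length ≤ 19
          · have hmin : min 19 t.length = t.length := by omega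
            have hdropt : t.drop 19 = [] := List.drop_eq_nil_of_le (by omega)
            have hdtl : tl.drop t.length = d := by
              conv_lhs => rw [← htd]
              rw [List.drop_append_of_le_length (by omega)]
              simp
            rw [hmin, hdropt, hdtl, pvEmit_nil]
            have hd_len : d.length ≤ tl.length := hd2 ▸ List.length_dropWhile_le _ _
            rw [ih d ws (by omega)]
            simp
          · have hmin : min 19 t.length = 19 := by omega
            rw [hmin]
            have hdrop_tl : tl.drop 19 = t.drop 19 ++ d := by
              conv_lhs => rw [← htd]
              rw [List.drop_append_of_le_length (by omega)]
            rw [hdrop_tl]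
            have htleq : t.length + d.length = tl.length := by
              rw [← htd]; simp
            have hlen' : (t.drop 19 ++ d).length ≤ n := by
              simp only [List.length_append, List.length_drop]
              omega
            rw [ih _ ws hlen']
            rw [pvSpec_char]
            have hsplit := run_split (t.drop 19) d
              (fun x hx => ht_short x (List.mem_of_mem_drop hx)) hd_head
            rw [hsplit.1, hsplit.2]
            congr 1
            rw [hd2, pvSpecTail_dropWhile]
        · rw [if_neg hw]
          have hwlen : ((min 19 t.length + 1 : Nat) : Int) < ws := by
            rw [hpoemlen] at hw; push_cast at hw ⊢; omega
          have hemit : pvEmit (p :: t) ws = p :: t := by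
            apply pvEmit_id
            simp only [List.length_cons]
            push_cast at hwlen ⊢
            omega
          rw [hemit]
          rw [ih tl ws htl_len]
          rw [pvSpec_char tl ws, ← ht, ← hd2]
          have hemit_t : pvEmit t ws = t := by
            apply pvEmit_id
            push_cast at hwlen ⊢
            omega
          rw [hemit_t, hd2, pvSpecTail_dropWhile]
          simp
      · rw [pvLoopA.eq_def, pvSpec.eq_def]
        simp only [hs, Bool.false_eq_true, if_false]
        have : tl.length ≤ n := by simp at hlen; omega
        rw [ih tl ws this]

-- ===== VERDICT (by name: the statement is the Claim_ definition above) =====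
theorem flatten_poem_lines_spec : Claim_equal_flatten_poem_lines := by
  intro ps ws _
  show flatten_poem_lines ps ws = flatten_poem_lines_alt ps ws
  rw [flatten_poem_lines, flatten_poem_lines_alt]
  have hb := foldl_eq_loopB ps [] [] ws
  simp only [List.nil_append] at hb
  rw [hb, loopB_eq_spec, loopA_eq_spec_aux ps.length ps ws le_rfl, pvSpec_char ps ws]
  simp only [List.nil_append]
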